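-- pv_equiv track=rewrite | github.com/uttkarshyadavv/daily-coding-practice | Prob257_Number_Of_Enclaves.py | solve
-- ===== SOURCE A (Python) =====
-- def dfs(r,c,visited,rows,column,mat):
--     if r>=rows or r<0 or c>=column or c<0:
--         return
--     if visited[r][c]==1:
--         return
--     if mat[r][c]==0:
--         return
--     visited[r][c]=1
--     dfs(r-1,c,visited,rows,column,mat)
--     dfs(r,c-1,visited,rows,column,mat)
--     dfs(r,c+1,visited,rows,column,mat)
--     dfs(r+1,c,visited,rows,column,mat)
--
-- def solve(mat):
--     rows=len(mat)
--     column=len(mat[0])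
--     visited=[[0]*column for _ in range(rows)]
--     for r in range(rows):
--         for c in range(column):
--             if r==0 or c==0 or r==rows-1 or c== column-1:
--                 if mat[r][c]==1:
--                     if visited[r][c]==0:
--                         dfs(r,c,visited,rows,column,mat)
--     count=0
--     for r in range(rows):
--         for c in range(column):
--             if mat[r][c]==1 and visited[r][c]==0:
--                 count+=1
--     return count
-- ===== SOURCE B (Python) =====
-- def solve(mat):
--     rows = len(mat)
--     cols = len(mat[0])
--     # multi-source fixpoint expansion from the boundary instead of recursive DFS
--     visited = {(r, c) for r in range(rows) for c in range(cols)
--                if (r == 0 or c == 0 or r == rows - 1 or c == cols - 1) and mat[r][c] == 1}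
--     while True:
--         new = {(r, c) for r in range(rows) for c in range(cols)
--                if (r, c) not in visited and mat[r][c] != 0
--                and ((r - 1, c) in visited or (r + 1, c) in visited
--                     or (r, c - 1) in visited or (r, c + 1) in visited)}
--         if not new:
--             break
--         visited |= new
--     return len([(r, c) for r in range(rows) for c in range(cols)
--                 if mat[r][c] == 1 and (r, c) not in visited])
-- ===== Notes on version B (the rewrite author's own statement) =====
-- stated objective: alternative
-- what changed: Replaces the recursive per-seed DFS with an iterative multi-source fixpoint expansion: start from all boundary 1-cells at once and repeatedly sweep the grid adding unvisited nonzero cells adjacent to the visited set until it stabilises, then count unvisited 1-cells.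
-- outside the precondition, e.g. on solve([]): A raises IndexError, B raises IndexError; on solve([[1, 1], [1]]): A raises IndexError, B raises IndexError
import Mathlib
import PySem

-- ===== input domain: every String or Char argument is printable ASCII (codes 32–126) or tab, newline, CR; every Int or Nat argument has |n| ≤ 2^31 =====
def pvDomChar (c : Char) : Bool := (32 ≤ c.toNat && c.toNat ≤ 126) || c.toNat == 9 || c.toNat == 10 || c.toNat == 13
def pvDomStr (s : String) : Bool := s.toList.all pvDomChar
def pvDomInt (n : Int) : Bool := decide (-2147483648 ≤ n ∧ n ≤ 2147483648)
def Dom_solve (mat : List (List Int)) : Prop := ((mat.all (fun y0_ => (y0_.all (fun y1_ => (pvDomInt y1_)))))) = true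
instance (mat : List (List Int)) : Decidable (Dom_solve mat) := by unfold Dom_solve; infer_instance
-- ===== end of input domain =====

-- B replaces A's recursive boundary DFS by a multi-source fixpoint expansion of the
-- boundary-connected set (objective: alternative algorithm, similar cost).
-- A mutates only its local `visited`; neither program mutates `mat`.

-- ===== PORT A =====
-- mat[r][c]; every access in both ports is guarded to be in range under Pre_solve,
-- so getD is exact there.
def matAt (mat : List (List Int)) (r c : Int) : Int :=
  (mat.getD r.toNat []).getD c.toNat 0

-- the visited matrix of 0/1 flags is represented as the finite set of marked cells;
-- fuel bounds the recursion depth (rows*cols+1 is always enough, proved below).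
def dfsA (mat : List (List Int)) (rows cols : Nat) :
    Nat → Int → Int → Finset (Int × Int) → Finset (Int × Int)
  | 0, _, _, V => V
  | fuel+1, r, c, V =>
    if (rows : Int) ≤ r ∨ r < 0 ∨ (cols : Int) ≤ c ∨ c < 0 then V
    else if (r, c) ∈ V then V
    else if matAt mat r c = 0 then V
    else
      let V1 := insert (r, c) V
      let V2 := dfsA mat rows cols fuel (r-1) c V1
      let V3 := dfsA mat rows cols fuel r (c-1) V2
      let V4 := dfsA mat rows cols fuel r (c+1) V3
      dfsA mat rows cols fuel (r+1) c V4

-- the body of A's seeding loops (named so the proofs can speak about it)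
def aSeedCell (mat : List (List Int)) (rows cols r : Nat)
    (V : Finset (Int × Int)) (c : Nat) : Finset (Int × Int) :=
  if r = 0 ∨ c = 0 ∨ r = rows - 1 ∨ c = cols - 1 then
    if matAt mat r c = 1 then
      if ((r : Int), (c : Int)) ∉ V then dfsA mat rows cols (rows * cols + 1) r c V
      else V
    else V
  else V

def aSeedRow (mat : List (List Int)) (rows cols : Nat)
    (V : Finset (Int × Int)) (r : Nat) : Finset (Int × Int) :=
  (List.range cols).foldl (aSeedCell mat rows cols r) V

def aVisited (mat : List (List Int)) (rows cols : Nat) : Finset (Int × Int) :=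
  (List.range rows).foldl (aSeedRow mat rows cols) ∅

-- the body of A's counting loops
def aCountRow (mat : List (List Int)) (cols : Nat) (V : Finset (Int × Int))
    (k : Int) (r : Nat) : Int :=
  (List.range cols).foldl
    (fun k (c : Nat) =>
      if matAt mat (r : Int) (c : Int) = 1 ∧ ((r : Int), (c : Int)) ∉ V then k + 1 else k) k

def solve (mat : List (List Int)) : Int :=
  let rows := mat.length
  let cols := (mat.headD []).length
  let V := aVisited mat rows cols
  (List.range rows).foldl (aCountRow mat cols V) 0

-- ===== PORT B =====
-- the in-range cells, in row-major order (the comprehension order of Source B)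
def univList (rows cols : Nat) : List (Int × Int) :=
  (List.range rows).flatMap (fun (r : Nat) =>
    (List.range cols).map (fun (c : Nat) => ((r : Int), (c : Int))))

def univCells (rows cols : Nat) : Finset (Int × Int) :=
  ((Finset.range rows) ×ˢ (Finset.range cols)).image (fun p => ((p.1 : Int), (p.2 : Int)))

def nbrs (p : Int × Int) : List (Int × Int) :=
  [(p.1 - 1, p.2), (p.1 + 1, p.2), (p.1, p.2 - 1), (p.1, p.2 + 1)]

-- Source B's `while True` loop; it stabilises after at most rows*cols rounds, so the
-- fuel rows*cols+1 passed by solve_alt makes this exact.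
def sweep (mat : List (List Int)) (rows cols : Nat) :
    Nat → Finset (Int × Int) → Finset (Int × Int)
  | 0, V => V
  | fuel+1, V =>
    let nw := (univCells rows cols).filter
      (fun q => q ∉ V ∧ matAt mat q.1 q.2 ≠ 0 ∧ (nbrs q).any (fun p => p ∈ V))
    if nw = ∅ then V else sweep mat rows cols fuel (V ∪ nw)

def solve_alt (mat : List (List Int)) : Int :=
  let rows := mat.length
  let cols := (mat.headD []).length
  let V0 := (univCells rows cols).filter (fun p =>
    (p.1 = 0 ∨ p.2 = 0 ∨ p.1 = (rows : Int) - 1 ∨ p.2 = (cols : Int) - 1)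
      ∧ matAt mat p.1 p.2 = 1)
  let V := sweep mat rows cols (rows * cols + 1) V0
  ((univList rows cols).filter (fun p => matAt mat p.1 p.2 = 1 ∧ p ∉ V)).length

-- ===== PRECONDITION & SPEC =====
-- Pre_ excludes exactly the inputs where A raises IndexError: the empty grid
-- (len(mat[0])) and grids with a row shorter than row 0.
def Pre_solve (mat : List (List Int)) : Prop :=
  mat ≠ [] ∧ ∀ row ∈ mat, (mat.headD []).length ≤ row.length
instance (mat : List (List Int)) : Decidable (Pre_solve mat) := by
  unfold Pre_solve; infer_instance

def pvWitness_solve : List (List Int) := [[1, 0, 1], [0, 1, 0], [0, 0, 1]]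

def Spec_solve (mat : List (List Int)) (out : Int) : Prop := out = solve_alt mat
instance (mat : List (List Int)) (out : Int) : Decidable (Spec_solve mat out) := by
  unfold Spec_solve; infer_instance

-- ===== CLAIM (what is proved, stated in full; the proofs are below) =====
def Claim_equal_solve : Prop :=
  ∀ (mat : List (List Int)), Dom_solve mat → Pre_solve mat → Spec_solve mat (solve mat)

-- ===== LEMMAS AND PROOFS =====

-- cells connected to a boundary 1-cell through nonzero cells: the set both
-- programs' `visited` is proved to equal
inductive Reach (mat : List (List Int)) (rows cols : Nat) : Int × Int → Prop
  | seed (p : Int × Int) : p ∈ univCells rows cols →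
      (p.1 = 0 ∨ p.2 = 0 ∨ p.1 = (rows : Int) - 1 ∨ p.2 = (cols : Int) - 1) →
      matAt mat p.1 p.2 = 1 → Reach mat rows cols p
  | step (p q : Int × Int) : Reach mat rows cols p → q ∈ nbrs p →
      q ∈ univCells rows cols → matAt mat q.1 q.2 ≠ 0 → Reach mat rows cols q

def Closed (mat : List (List Int)) (rows cols : Nat) (V : Finset (Int × Int)) : Prop :=
  ∀ p ∈ V, ∀ q ∈ nbrs p, q ∈ univCells rows cols → matAt mat q.1 q.2 ≠ 0 → q ∈ V

def munv (rows cols : Nat) (V : Finset (Int × Int)) : Nat :=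
  ((univCells rows cols) \ V).card

theorem mem_univCells {rows cols : Nat} {p : Int × Int} :
    p ∈ univCells rows cols ↔ 0 ≤ p.1 ∧ p.1 < rows ∧ 0 ≤ p.2 ∧ p.2 < cols := by
  constructor
  · intro h
    simp only [univCells, Finset.mem_image, Finset.mem_product, Finset.mem_range] at h
    obtain ⟨⟨a, b⟩, ⟨ha, hb⟩, h⟩ := h
    cases h; constructor <;> simp <;> omega
  · rintro ⟨h1, h2, h3, h4⟩
    simp only [univCells, Finset.mem_image, Finset.mem_product, Finset.mem_range]
    exact ⟨⟨p.1.toNat, p.2.toNat⟩, ⟨by omega, by omega⟩, by simp [Prod.ext_iff]; omega⟩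

theorem nbrs_symm {p q : Int × Int} (h : p ∈ nbrs q) : q ∈ nbrs p := by
  obtain ⟨q1, q2⟩ := q
  simp only [nbrs, List.mem_cons, List.not_mem_nil, or_false] at h ⊢
  rcases h with rfl | rfl | rfl | rfl <;> simp [Prod.ext_iff] <;> omega

theorem card_univCells_le (rows cols : Nat) : (univCells rows cols).card ≤ rows * cols := by
  calc (univCells rows cols).card ≤ ((Finset.range rows) ×ˢ (Finset.range cols)).card :=
        Finset.card_image_le
    _ = rows * cols := by simp

theorem munv_le_of_subset {rows cols : Nat} {V W : Finset (Int × Int)} (h : V ⊆ W) :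
    munv rows cols W ≤ munv rows cols V :=
  Finset.card_le_card (Finset.sdiff_subset_sdiff (Finset.Subset.refl _) h)

theorem munv_lt_insert {rows cols : Nat} {V : Finset (Int × Int)} {p : Int × Int}
    (hu : p ∈ univCells rows cols) (hp : p ∉ V) :
    munv rows cols (insert p V) < munv rows cols V := by
  have h1 : munv rows cols (insert p V) ≤ ((univCells rows cols \ V).erase p).card := by
    apply Finset.card_le_card
    intro x hx
    simp only [Finset.mem_sdiff, Finset.mem_insert, not_or] at hx
    simp only [Finset.mem_erase, Finset.mem_sdiff]
    exact ⟨hx.2.1, hx.1, hx.2.2⟩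
  have h2 : ((univCells rows cols \ V).erase p).card < (univCells rows cols \ V).card :=
    Finset.card_erase_lt_of_mem (Finset.mem_sdiff.mpr ⟨hu, hp⟩)
  exact lt_of_le_of_lt h1 h2

theorem munv_bound (rows cols : Nat) (V : Finset (Int × Int)) :
    munv rows cols V < rows * cols + 1 :=
  lt_of_le_of_lt (le_trans (Finset.card_le_card Finset.sdiff_subset) (card_univCells_le rows cols))
    (Nat.lt_succ_self _)

-- dfsA: monotone; stays in the grid; with enough fuel it marks its (valid, land)
-- argument and every newly marked cell has all its land neighbours marked.
theorem dfsA_spec (mat : List (List Int)) (rows cols : Nat) :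
    ∀ (fuel : Nat) (r c : Int) (V : Finset (Int × Int)),
      V ⊆ univCells rows cols → munv rows cols V < fuel →
      V ⊆ dfsA mat rows cols fuel r c V ∧
      dfsA mat rows cols fuel r c V ⊆ univCells rows cols ∧
      ((r, c) ∈ univCells rows cols → matAt mat r c ≠ 0 →
        (r, c) ∈ dfsA mat rows cols fuel r c V) ∧
      (∀ p ∈ dfsA mat rows cols fuel r c V, p ∉ V →
        ∀ q ∈ nbrs p, q ∈ univCells rows cols → matAt mat q.1 q.2 ≠ 0 →
          q ∈ dfsA mat rows cols fuel r c V) := by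
  intro fuel
  induction fuel with
  | zero => intro r c V _ h; omega
  | succ fuel IH =>
    intro r c V hV hm
    rw [dfsA]
    by_cases hg : (rows : Int) ≤ r ∨ r < 0 ∨ (cols : Int) ≤ c ∨ c < 0
    · simp only [if_pos hg]
      refine ⟨Finset.Subset.refl _, hV, ?_, ?_⟩
      · intro hu _; rw [mem_univCells] at hu; simp at hu; omega
      · intro p hp hp' ; exact (hp' hp).elim
    · simp only [if_neg hg]
      push_neg at hg
      have hrcu : ((r, c) : Int × Int) ∈ univCells rows cols := by
        rw [mem_univCells]; simp; omega
      by_cases hv : ((r, c) : Int × Int) ∈ V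
      · simp only [if_pos hv]
        exact ⟨Finset.Subset.refl _, hV, fun _ _ => hv, fun p hp hp' => (hp' hp).elim⟩
      · simp only [if_neg hv]
        by_cases h0 : matAt mat r c = 0
        · simp only [if_pos h0]
          exact ⟨Finset.Subset.refl _, hV, fun _ hn => (hn h0).elim,
            fun p hp hp' => (hp' hp).elim⟩
        · simp only [if_neg h0]
          set V1 := insert ((r, c) : Int × Int) V with hV1def
          have hV1u : V1 ⊆ univCells rows cols := Finset.insert_subset hrcu hV
          have hm1 : munv rows cols V1 < fuel := by
            have h := munv_lt_insert (rows := rows) (cols := cols) hrcu hv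
            rw [hV1def]
            omega
          obtain ⟨s2, u2, t2, c2⟩ := IH (r-1) c V1 hV1u hm1
          set V2 := dfsA mat rows cols fuel (r-1) c V1 with hV2def
          have hm2 : munv rows cols V2 < fuel := lt_of_le_of_lt (munv_le_of_subset s2) hm1
          obtain ⟨s3, u3, t3, c3⟩ := IH r (c-1) V2 u2 hm2
          set V3 := dfsA mat rows cols fuel r (c-1) V2 with hV3def
          have hm3 : munv rows cols V3 < fuel := lt_of_le_of_lt (munv_le_of_subset s3) hm2
          obtain ⟨s4, u4, t4, c4⟩ := IH r (c+1) V3 u3 hm3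
          set V4 := dfsA mat rows cols fuel r (c+1) V3 with hV4def
          have hm4 : munv rows cols V4 < fuel := lt_of_le_of_lt (munv_le_of_subset s4) hm3
          obtain ⟨s5, u5, t5, c5⟩ := IH (r+1) c V4 u4 hm4
          set V5 := dfsA mat rows cols fuel (r+1) c V4 with hV5def
          have hsub : V1 ⊆ V5 := Finset.Subset.trans s2 (Finset.Subset.trans s3 (Finset.Subset.trans s4 s5))
          have hrc5 : ((r, c) : Int × Int) ∈ V5 := hsub (Finset.mem_insert_self _ _)
          refine ⟨Finset.Subset.trans (Finset.subset_insert _ _) hsub, u5, fun _ _ => hrc5, ?_⟩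
          intro p hp hpV q hq hqu hq0
          by_cases hp1 : p ∈ V1
          · -- p = (r,c): each neighbour is handled by the corresponding recursive call
            have hprc : p = (r, c) := by
              rcases Finset.mem_insert.mp hp1 with h | h
              · exact h
              · exact absurd h hpV
            subst hprc
            simp only [nbrs, List.mem_cons, List.not_mem_nil, or_false] at hq
            rcases hq with rfl | rfl | rfl | rfl
            · exact Finset.Subset.trans s3 (Finset.Subset.trans s4 s5) (t2 hqu hq0)
            · exact t5 hqu hq0
            · exact Finset.Subset.trans s4 s5 (t3 hqu hq0)
            · exact s5 (t4 hqu hq0)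
          · by_cases hp2 : p ∈ V2
            · exact Finset.Subset.trans s3 (Finset.Subset.trans s4 s5) (c2 p hp2 hp1 q hq hqu hq0)
            · by_cases hp3 : p ∈ V3
              · exact Finset.Subset.trans s4 s5 (c3 p hp3 hp2 q hq hqu hq0)
              · by_cases hp4 : p ∈ V4
                · exact s5 (c4 p hp4 hp3 q hq hqu hq0)
                · exact c5 p hp hp4 q hq hqu hq0

theorem dfsA_sound (mat : List (List Int)) (rows cols : Nat) :
    ∀ (fuel : Nat) (r c : Int) (V : Finset (Int × Int)),
      (∀ p ∈ V, Reach mat rows cols p) →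
      ((r, c) ∈ univCells rows cols → matAt mat r c ≠ 0 → Reach mat rows cols (r, c)) →
      ∀ p ∈ dfsA mat rows cols fuel r c V, Reach mat rows cols p := by
  intro fuel
  induction fuel with
  | zero => intro r c V hV _ p hp; rw [dfsA] at hp; exact hV p hp
  | succ fuel IH =>
    intro r c V hV hpre p hp
    rw [dfsA] at hp
    split_ifs at hp with h1 h2 h3
    · exact hV p hp
    · exact hV p hp
    · exact hV p hp
    · push_neg at h1
      have hrcu : ((r, c) : Int × Int) ∈ univCells rows cols := by
        rw [mem_univCells]; simp; omega
      have hrc : Reach mat rows cols (r, c) := hpre hrcu h3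
      have hV1 : ∀ q ∈ insert ((r, c) : Int × Int) V, Reach mat rows cols q := by
        intro q hq
        rcases Finset.mem_insert.mp hq with rfl | hq
        · exact hrc
        · exact hV q hq
      have hstep : ∀ q : Int × Int, q ∈ nbrs ((r, c) : Int × Int) →
          q ∈ univCells rows cols → matAt mat q.1 q.2 ≠ 0 → Reach mat rows cols q :=
        fun q hq hu h0 => Reach.step _ q hrc hq hu h0
      refine IH (r+1) c _ (fun q hq => ?_) (fun hu h0 => hstep _ ?_ hu h0) p hp
      · refine IH r (c+1) _ (fun q' hq' => ?_) (fun hu h0 => hstep _ ?_ hu h0) q hq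
        · refine IH r (c-1) _ (fun q'' hq'' => ?_) (fun hu h0 => hstep _ ?_ hu h0) q' hq'
          · exact IH (r-1) c _ hV1 (fun hu h0 => hstep _ (by simp [nbrs]) hu h0) q'' hq''
          · simp [nbrs]
        · simp [nbrs]
      · simp [nbrs]

-- invariant carried through A's seeding loops
def AInv (mat : List (List Int)) (rows cols : Nat) (V : Finset (Int × Int)) : Prop :=
  V ⊆ univCells rows cols ∧ Closed mat rows cols V ∧ ∀ p ∈ V, Reach mat rows cols p

theorem aSeedCell_spec (mat : List (List Int)) (rows cols r c : Nat)
    (hr : r < rows) (hc : c < cols) (V : Finset (Int × Int)) (h : AInv mat rows cols V) :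
    AInv mat rows cols (aSeedCell mat rows cols r V c) ∧
    V ⊆ aSeedCell mat rows cols r V c ∧
    ((r = 0 ∨ c = 0 ∨ r = rows - 1 ∨ c = cols - 1) → matAt mat r c = 1 →
      ((r : Int), (c : Int)) ∈ aSeedCell mat rows cols r V c) := by
  obtain ⟨hu, hcl, hre⟩ := h
  unfold aSeedCell
  split_ifs with hb h1 hv
  · -- already visited
    exact ⟨⟨hu, hcl, hre⟩, Finset.Subset.refl _, fun _ _ => hv⟩
  · -- dfs call
    have hrcu : (((r : Int), (c : Int)) : Int × Int) ∈ univCells rows cols := by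
      rw [mem_univCells]; simp; omega
    obtain ⟨s, u, t, cl⟩ := dfsA_spec mat rows cols (rows * cols + 1) r c V hu
      (munv_bound rows cols V)
    have hmark := t hrcu (by rw [h1]; exact one_ne_zero)
    refine ⟨⟨u, ?_, ?_⟩, s, fun _ _ => hmark⟩
    · intro p hp q hq hqu hq0
      by_cases hpV : p ∈ V
      · exact s (hcl p hpV q hq hqu hq0)
      · exact cl p hp hpV q hq hqu hq0
    · refine dfsA_sound mat rows cols _ r c V hre (fun _ _ => ?_)
      refine Reach.seed _ hrcu ?_ (by exact_mod_cast h1)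
      simp only []
      rcases hb with h | h | h | h
      · left; exact_mod_cast congrArg (Nat.cast : Nat → Int) h
      · right; left; exact_mod_cast congrArg (Nat.cast : Nat → Int) h
      · right; right; left; omega
      · right; right; right; omega
  · exact ⟨⟨hu, hcl, hre⟩, Finset.Subset.refl _, fun _ hm => (h1 hm).elim⟩
  · exact ⟨⟨hu, hcl, hre⟩, Finset.Subset.refl _, fun hb' _ => (hb hb').elim⟩

theorem aSeedRow_spec (mat : List (List Int)) (rows cols r : Nat) (hr : r < rows) :
    ∀ (l : List Nat), (∀ c ∈ l, c < cols) → ∀ (V : Finset (Int × Int)),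
      AInv mat rows cols V →
      AInv mat rows cols (l.foldl (aSeedCell mat rows cols r) V) ∧
      V ⊆ l.foldl (aSeedCell mat rows cols r) V ∧
      (∀ c ∈ l, (r = 0 ∨ c = 0 ∨ r = rows - 1 ∨ c = cols - 1) → matAt mat r c = 1 →
        ((r : Int), (c : Int)) ∈ l.foldl (aSeedCell mat rows cols r) V) := by
  intro l
  induction l with
  | nil => intro _ V h; exact ⟨h, Finset.Subset.refl _, by simp⟩
  | cons c l IH =>
    intro hl V h
    obtain ⟨h1, h2, h3⟩ := aSeedCell_spec mat rows cols r c hr (hl c (by simp)) V h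
    obtain ⟨g1, g2, g3⟩ := IH (fun x hx => hl x (by simp [hx])) _ h1
    refine ⟨g1, Finset.Subset.trans h2 g2, ?_⟩
    intro c' hc' hb hm
    rcases List.mem_cons.mp hc' with rfl | hc'
    · exact g2 (h3 hb hm)
    · exact g3 c' hc' hb hm

theorem aVisited_spec (mat : List (List Int)) (rows cols : Nat) :
    AInv mat rows cols (aVisited mat rows cols) ∧
    (∀ r ∈ List.range rows, ∀ c < cols,
      (r = 0 ∨ c = 0 ∨ r = rows - 1 ∨ c = cols - 1) → matAt mat r c = 1 →
      ((r : Int), (c : Int)) ∈ aVisited mat rows cols) := by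
  have main : ∀ (l : List Nat), (∀ r ∈ l, r < rows) → ∀ (V : Finset (Int × Int)),
      AInv mat rows cols V →
      AInv mat rows cols (l.foldl (aSeedRow mat rows cols) V) ∧
      V ⊆ l.foldl (aSeedRow mat rows cols) V ∧
      (∀ r ∈ l, ∀ c < cols,
        (r = 0 ∨ c = 0 ∨ r = rows - 1 ∨ c = cols - 1) → matAt mat r c = 1 →
        ((r : Int), (c : Int)) ∈ l.foldl (aSeedRow mat rows cols) V) := by
    intro l
    induction l with
    | nil => intro _ V h; exact ⟨h, Finset.Subset.refl _, by simp⟩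
    | cons r l IH =>
      intro hl V h
      obtain ⟨h1, h2, h3⟩ := aSeedRow_spec mat rows cols r (hl r (by simp))
        (List.range cols) (by simp) V h
      obtain ⟨g1, g2, g3⟩ := IH (fun x hx => hl x (by simp [hx])) _ h1
      refine ⟨g1, Finset.Subset.trans h2 g2, ?_⟩
      intro r' hr' c hc hb hm2x
      rcases List.mem_cons.mp hr' with rfl | hr'
      · exact g2 (h3 c (List.mem_range.mpr hc) hb hm2x)
      · exact g3 r' hr' c hc hb hm2x
  have h0 : AInv mat rows cols ∅ := ⟨Finset.empty_subset _, fun p hp => absurd hp (by simp),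
    fun p hp => absurd hp (by simp)⟩
  obtain ⟨h1, _, h3⟩ := main (List.range rows) (by simp) ∅ h0
  exact ⟨h1, fun r hr c hc => h3 r hr c hc⟩

-- A's visited set is exactly Reach
theorem aVisited_char (mat : List (List Int)) (rows cols : Nat) (p : Int × Int) :
    p ∈ aVisited mat rows cols ↔ Reach mat rows cols p := by
  obtain ⟨⟨hu, hcl, hre⟩, hseed⟩ := aVisited_spec mat rows cols
  constructor
  · exact hre p
  · intro h
    induction h with
    | seed p hpu hb hm =>
      rw [mem_univCells] at hpu
      obtain ⟨a, b⟩ := p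
      simp only at hpu hb hm ⊢
      have ha : ((a.toNat : Nat) : Int) = a := by omega
      have hb2 : ((b.toNat : Nat) : Int) = b := by omega
      have hres := hseed a.toNat (List.mem_range.mpr (by omega)) b.toNat (by omega)
        (by rcases hb with h | h | h | h
            · left; omega
            · right; left; omega
            · right; right; left; omega
            · right; right; right; omega)
        (by rw [ha, hb2]; exact hm)
      rwa [ha, hb2] at hres
    | step p q _ hq hqu hq0 IH => exact hcl p IH q hq hqu hq0

-- sweep lemmas
theorem sweep_mono (mat : List (List Int)) (rows cols : Nat) :
    ∀ (fuel : Nat) (V : Finset (Int × Int)), V ⊆ sweep mat rows cols fuel V := by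
  intro fuel
  induction fuel with
  | zero => intro V; rw [sweep]
  | succ fuel IH =>
    intro V
    rw [sweep]
    split_ifs with h
    · exact Finset.Subset.refl _
    · exact Finset.Subset.trans Finset.subset_union_left (IH _)

theorem sweep_sound (mat : List (List Int)) (rows cols : Nat) :
    ∀ (fuel : Nat) (V : Finset (Int × Int)),
      (∀ p ∈ V, Reach mat rows cols p) →
      ∀ p ∈ sweep mat rows cols fuel V, Reach mat rows cols p := by
  intro fuel
  induction fuel with
  | zero => intro V h p hp; rw [sweep] at hp; exact h p hp
  | succ fuel IH =>
    intro V h p hp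
    rw [sweep] at hp
    split_ifs at hp with hn
    · exact h p hp
    · refine IH _ ?_ p hp
      intro q hq
      rcases Finset.mem_union.mp hq with hq | hq
      · exact h q hq
      · simp only [Finset.mem_filter, List.any_eq_true, decide_eq_true_eq] at hq
        obtain ⟨hqu, _, hq0, pp, hpp, hppV⟩ := hq
        exact Reach.step pp q (h pp hppV) (nbrs_symm hpp) hqu hq0

theorem sweep_closed (mat : List (List Int)) (rows cols : Nat) :
    ∀ (fuel : Nat) (V : Finset (Int × Int)), V ⊆ univCells rows cols →
      munv rows cols V < fuel → Closed mat rows cols (sweep mat rows cols fuel V) := by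
  intro fuel
  induction fuel with
  | zero => intro V _ h; omega
  | succ fuel IH =>
    intro V hV hm
    rw [sweep]
    split_ifs with hn
    · -- fixpoint: no cell can be added, so V is closed
      intro p hp q hq hqu hq0
      by_contra hqV
      have : q ∈ (univCells rows cols).filter
          (fun q => q ∉ V ∧ matAt mat q.1 q.2 ≠ 0 ∧ (nbrs q).any (fun p => p ∈ V)) := by
        simp only [Finset.mem_filter, List.any_eq_true, decide_eq_true_eq]
        exact ⟨hqu, hqV, hq0, p, nbrs_symm hq, hp⟩
      rw [hn] at this
      exact absurd this (by simp)
    · refine IH _ (Finset.union_subset hV (Finset.filter_subset _ _)) ?_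
      obtain ⟨x, hx⟩ := Finset.nonempty_iff_ne_empty.mpr hn
      have hxu : x ∈ univCells rows cols := (Finset.mem_filter.mp hx).1
      have hxV : x ∉ V := (Finset.mem_filter.mp hx).2.1
      have h1 : insert x V ⊆ V ∪ (univCells rows cols).filter
          (fun q => q ∉ V ∧ matAt mat q.1 q.2 ≠ 0 ∧ (nbrs q).any (fun p => p ∈ V)) := by
        rw [Finset.insert_subset_iff]
        exact ⟨Finset.mem_union_right _ hx, Finset.subset_union_left⟩
      have := lt_of_le_of_lt (munv_le_of_subset h1) (munv_lt_insert hxu hxV)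
      omega

-- B's visited set is exactly Reach
theorem bVisited_char (mat : List (List Int)) (rows cols : Nat) (p : Int × Int) :
    p ∈ sweep mat rows cols (rows * cols + 1)
        ((univCells rows cols).filter (fun p =>
          (p.1 = 0 ∨ p.2 = 0 ∨ p.1 = (rows : Int) - 1 ∨ p.2 = (cols : Int) - 1)
            ∧ matAt mat p.1 p.2 = 1)) ↔ Reach mat rows cols p := by
  set V0 := (univCells rows cols).filter (fun p =>
    (p.1 = 0 ∨ p.2 = 0 ∨ p.1 = (rows : Int) - 1 ∨ p.2 = (cols : Int) - 1)
      ∧ matAt mat p.1 p.2 = 1) with hV0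
  have hV0u : V0 ⊆ univCells rows cols := Finset.filter_subset _ _
  constructor
  · refine sweep_sound mat rows cols _ V0 ?_ p
    intro q hq
    simp only [hV0, Finset.mem_filter, decide_eq_true_eq] at hq
    exact Reach.seed q hq.1 hq.2.1 hq.2.2
  · intro h
    induction h with
    | seed q hqu hb hm =>
      refine sweep_mono mat rows cols _ V0 ?_
      simp only [hV0, Finset.mem_filter, decide_eq_true_eq]
      exact ⟨hqu, hb, hm⟩
    | step q q' _ hq' hq'u hq'0 IH =>
      exact sweep_closed mat rows cols _ V0 hV0u (munv_bound rows cols V0)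
        q IH q' hq' hq'u hq'0

-- counting: A's nested counting folds equal the length of B's filtered list
theorem foldl_if_count {α : Type} (p : α → Prop) [DecidablePred p] :
    ∀ (l : List α) (k : Int),
      l.foldl (fun k x => if p x then k + 1 else k) k
        = k + ((l.filter (fun x => decide (p x))).length : Int) := by
  intro l
  induction l with
  | nil => intro k; simp
  | cons a l IH =>
    intro k
    by_cases h : p a
    · rw [List.foldl_cons, if_pos h, IH, List.filter_cons_of_pos (by simp [h])]
      simp only [List.length_cons]
      push_cast
      ring
    · rw [List.foldl_cons, if_neg h, IH, List.filter_cons_of_neg (by simp [h])]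

theorem foldl_nested_flatMap {α β γ : Type} (f : α → List β) (g : γ → β → γ) :
    ∀ (l : List α) (k : γ),
      l.foldl (fun k a => (f a).foldl g k) k = (l.flatMap f).foldl g k := by
  intro l
  induction l with
  | nil => intro k; simp
  | cons a l IH =>
    intro k
    simp only [List.foldl_cons, List.flatMap_cons, List.foldl_append]
    exact IH _

theorem countA_eq (mat : List (List Int)) (rows cols : Nat) (V : Finset (Int × Int)) :
    (List.range rows).foldl (aCountRow mat cols V) 0
      = (((univList rows cols).filter
          (fun p => matAt mat p.1 p.2 = 1 ∧ p ∉ V)).length : Int) := by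
  have h1 : ∀ (r : Nat) (k : Int), aCountRow mat cols V k r =
      ((List.range cols).map (fun c => (((r : Nat) : Int), ((c : Nat) : Int)))).foldl
        (fun k p => if matAt mat p.1 p.2 = 1 ∧ p ∉ V then k + 1 else k) k := by
    intro r k
    simp only [aCountRow]
    rw [List.foldl_map]
  have h2 : aCountRow mat cols V = fun (k : Int) (r : Nat) =>
      ((List.range cols).map (fun c => (((r : Nat) : Int), ((c : Nat) : Int)))).foldl
        (fun k p => if matAt mat p.1 p.2 = 1 ∧ p ∉ V then k + 1 else k) k := by
    funext k r
    exact h1 r k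
  calc (List.range rows).foldl (aCountRow mat cols V) 0
      = (List.range rows).foldl (fun (k : Int) (r : Nat) =>
          ((List.range cols).map (fun c => (((r : Nat) : Int), ((c : Nat) : Int)))).foldl
            (fun k p => if matAt mat p.1 p.2 = 1 ∧ p ∉ V then k + 1 else k) k) 0 := by
        rw [h2]
    _ = ((univList rows cols).foldl
          (fun k p => if matAt mat p.1 p.2 = 1 ∧ p ∉ V then k + 1 else k) 0) := by
        rw [univList, ← foldl_nested_flatMap]
    _ = (((univList rows cols).filter
          (fun p => matAt mat p.1 p.2 = 1 ∧ p ∉ V)).length : Int) := by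
        rw [foldl_if_count]; simp

-- ===== VERDICT (by name: the statement is the Claim_ definition above) =====
theorem solve_spec : Claim_equal_solve := by
  intro mat _ _
  show solve mat = solve_alt mat
  unfold solve solve_alt
  have hVeq : aVisited mat mat.length (mat.headD []).length
      = sweep mat mat.length (mat.headD []).length
          (mat.length * (mat.headD []).length + 1)
          ((univCells mat.length (mat.headD []).length).filter (fun p =>
            (p.1 = 0 ∨ p.2 = 0 ∨ p.1 = (mat.length : Int) - 1
              ∨ p.2 = ((mat.headD []).length : Int) - 1)
              ∧ matAt mat p.1 p.2 = 1)) := by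
    apply Finset.ext
    intro p
    rw [aVisited_char, bVisited_char]
  simp only []
  rw [hVeq, countA_eq]
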